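-- pv_equiv track=rewrite | github.com/highjun/wearing-vs-carrying | LDA/tmp.py | get_active_level
-- ===== SOURCE A (Python) =====
-- thd = 100
--
-- def get_active_level(b,p,w):
--     total = b+p+w
--     word = [0,0,0]
--     # word = [0]
--     for idx, step in enumerate([total,p,w]):
--         if step == 0:
--             pass
--         elif step <= thd:
--             word[idx] = 1
--         else:
--             if idx == 0:
--                 word[idx] = 2
--             else:
--                 word[idx] = 1
--
--     return word[0]
-- ===== SOURCE B (Python) =====
-- thd = 100
--
-- def get_active_level(b, p, w):
--     # Branchless arithmetic formulation: the level is the count of thresholds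
--     # the total clears: nonzero contributes 1, exceeding thd contributes 1 more.
--     total = b + p + w
--     return int(total != 0) + int(total > thd)
-- ===== Notes on version B (the rewrite author's own statement) =====
-- stated objective: simpler
-- what changed: A builds a three-element word list and loops with enumerate over [total,p,w] (only index 0 of which matters); B removes the list, the loop and all branching, computing the level arithmetically as the sum of two boolean indicators int(total != 0) + int(total > thd).
import Mathlib
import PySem

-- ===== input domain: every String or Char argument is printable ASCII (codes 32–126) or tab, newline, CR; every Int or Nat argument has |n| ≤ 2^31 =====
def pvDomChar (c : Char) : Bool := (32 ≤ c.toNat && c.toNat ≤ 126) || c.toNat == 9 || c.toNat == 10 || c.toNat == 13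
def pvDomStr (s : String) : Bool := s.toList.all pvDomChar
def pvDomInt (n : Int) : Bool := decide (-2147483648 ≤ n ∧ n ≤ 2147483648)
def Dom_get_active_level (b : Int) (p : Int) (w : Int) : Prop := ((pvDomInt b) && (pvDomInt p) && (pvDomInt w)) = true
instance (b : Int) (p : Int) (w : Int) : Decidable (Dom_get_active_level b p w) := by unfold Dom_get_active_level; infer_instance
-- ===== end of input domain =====

-- ===== PORT A =====
-- B replaces A's word-list + enumerate loop with a branchless sum of two boolean indicators (simpler).
def get_active_level (b : Int) (p : Int) (w : Int) : Int :=
  let total := b + p + w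
  let word : List Int := [0, 0, 0]
  let word := (PySem.List.enumerate [total, p, w]).foldl
    (fun word step =>
      if step.2 = 0 then word
      else if step.2 ≤ 100 then word.set step.1.toNat 1
      else if step.1 = 0 then word.set step.1.toNat 2
      else word.set step.1.toNat 1) word  -- enumerate indices are 0,1,2: toNat is exact here
  word.getD 0 0

-- ===== PORT B =====
def get_active_level_alt (b : Int) (p : Int) (w : Int) : Int :=
  let total := b + p + w
  (if total ≠ 0 then (1 : Int) else 0) + (if total > 100 then 1 else 0)

-- ===== PRECONDITION & SPEC =====
def Spec_get_active_level (b : Int) (p : Int) (w : Int) (out : Int) : Prop := out = get_active_level_alt b p w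
instance (b : Int) (p : Int) (w : Int) (out : Int) : Decidable (Spec_get_active_level b p w out) := by unfold Spec_get_active_level; infer_instance

-- ===== CLAIM (what is proved, stated in full; the proofs are below) =====
def Claim_equal_get_active_level : Prop := ∀ (b : Int) (p : Int) (w : Int), Dom_get_active_level b p w → Spec_get_active_level b p w (get_active_level b p w)

-- ===== LEMMAS AND PROOFS =====

-- ===== VERDICT (by name: the statement is the Claim_ definition above) =====
theorem get_active_level_spec : Claim_equal_get_active_level := by
  intro b p w _
  unfold Spec_get_active_level get_active_level get_active_level_alt
  simp only [PySem.List.enumerate_cons, PySem.List.enumerate_nil, List.foldl]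
  split_ifs <;> simp <;> omega
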